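-- pv_equiv track=rewrite | github.com/hyewonji/Algorithm | programmers/level2/42578.py | solution
-- ===== SOURCE A (Python) =====
-- import collections
--
-- def solution(clothes):
--     answer = 1
--     kind = []
--
--     for a, b in clothes:
--         kind.append(b)
--
--     kind = collections.Counter(kind)
--
--     for i in kind.values():
--     	answer *= (i + 1)
--
--     return answer - 1
-- ===== SOURCE B (Python) =====
-- def solution(clothes):
--     labels = sorted(b for _, b in clothes)
--     total = 1
--     while labels:
--         run = 1
--         while run < len(labels) and labels[run] == labels[0]:
--             run += 1
--         total *= run + 1
--         labels = labels[run:]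
--     return total - 1
-- ===== Notes on version B (the rewrite author's own statement) =====
-- stated objective: alternative
-- what changed: Replaces the hash Counter over category labels by sorting the labels and multiplying (run length + 1) over consecutive equal runs in one scan.
import Mathlib
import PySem

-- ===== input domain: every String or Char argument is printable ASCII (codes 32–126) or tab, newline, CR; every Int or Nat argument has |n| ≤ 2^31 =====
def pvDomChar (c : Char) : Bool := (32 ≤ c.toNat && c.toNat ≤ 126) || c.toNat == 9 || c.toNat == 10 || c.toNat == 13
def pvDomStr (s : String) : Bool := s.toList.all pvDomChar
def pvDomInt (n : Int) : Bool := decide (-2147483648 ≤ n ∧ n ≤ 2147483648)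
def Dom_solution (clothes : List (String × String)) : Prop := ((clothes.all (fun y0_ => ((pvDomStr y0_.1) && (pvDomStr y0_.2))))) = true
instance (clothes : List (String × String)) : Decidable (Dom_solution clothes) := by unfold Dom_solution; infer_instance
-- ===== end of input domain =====

-- B replaces A's hash Counter by sorting the category labels and multiplying (run length + 1)
-- over consecutive equal runs in one scan (alternative algorithm, same return value).


-- ===== PORT A =====
-- literal transliteration: build kind by appending b, Counter it, multiply (i+1) over values
def solution (clothes : List (String × String)) : Int :=
  ((PySem.Dict.counter (clothes.foldl (fun acc p => acc ++ [p.2]) ([] : List String))).values.foldl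
      (fun a i => a * (i + 1)) (1 : Int)) - 1

-- ===== PORT B =====
-- outer while loop of Source B: consume one run of equal labels at the head, multiply (run+1)
def pvRunLoop : List String → Int → Int
  | [], total => total
  | x :: xs, total =>
    let run := 1 + (xs.takeWhile (fun y => y == x)).length
    pvRunLoop (xs.drop (run - 1)) (total * ((run : Int) + 1))
termination_by s _ => s.length
decreasing_by
  simp only [List.length_cons, List.length_drop]
  omega

def solution_alt (clothes : List (String × String)) : Int :=
  pvRunLoop (PySem.List.sorted (clothes.map (fun p => p.2)) (fun x => x) false) 1 - 1

-- ===== PRECONDITION & SPEC =====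
def Spec_solution (clothes : List (String × String)) (out : Int) : Prop := out = solution_alt clothes
instance (clothes : List (String × String)) (out : Int) : Decidable (Spec_solution clothes out) := by unfold Spec_solution; infer_instance

-- ===== CLAIM (what is proved, stated in full; the proofs are below) =====
def Claim_equal_solution : Prop := ∀ (clothes : List (String × String)), Dom_solution clothes → Spec_solution clothes (solution clothes)

-- ===== LEMMAS AND PROOFS =====

-- the common value: product of (count+1) over the distinct labels
def pvProd (l : List String) : Int :=
  ((PySem.Set.ofList l).map (fun k => ((l.count k : Int) + 1))).prod

lemma pvProd_perm (l l' : List String) (h : l.Perm l') : pvProd l = pvProd l' := by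
  unfold pvProd
  have hm : ∀ k, l.count k = l'.count k := fun k => h.count_eq k
  simp only [hm]
  have hperm : (PySem.Set.ofList l).Perm (PySem.Set.ofList l') := by
    apply (List.perm_ext_iff_of_nodup (PySem.Set.nodup_ofList l) (PySem.Set.nodup_ofList l')).mpr
    intro a
    simp only [PySem.Set.mem_ofList]
    exact h.mem_iff
  exact (hperm.map _).prod_eq

lemma foldl_mul_succ (v : List Int) (init : Int) :
    v.foldl (fun a i => a * (i + 1)) init = init * (v.map (fun i => i + 1)).prod := by
  induction v generalizing init with
  | nil => simp
  | cons x xs ih => simp [List.foldl_cons, ih, mul_assoc]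

-- A's value is pvProd of the label list, minus one
lemma solution_eq_pvProd (clothes : List (String × String)) :
    solution clothes = pvProd (clothes.map (fun p => p.2)) - 1 := by
  unfold solution
  rw [PySem.List.foldl_append_singleton_eq_map]
  have hv : (PySem.Dict.counter (clothes.map (fun p => p.2))).values
      = (PySem.Set.ofList (clothes.map (fun p => p.2))).map
          (fun k => ((clothes.map (fun p => p.2)).count k : Int)) := by
    show ((PySem.Dict.counter (clothes.map (fun p => p.2))).items.map (·.2)) = _
    rw [PySem.Dict.items_counter]
    simp [List.map_map, Function.comp]
  rw [List.nil_append] at *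
  rw [hv, foldl_mul_succ]
  unfold pvProd
  simp [List.map_map, Function.comp_def]

-- in a sorted list whose every element is ≥ x, x does not survive dropWhile (== x)
lemma not_mem_dropWhile_of_sorted (x : String) (xs : List String)
    (hp : xs.Pairwise (· ≤ ·)) (hge : ∀ y ∈ xs, x ≤ y) :
    x ∉ xs.dropWhile (fun y => y == x) := by
  induction xs with
  | nil => simp
  | cons z zs ih =>
    by_cases hz : z = x
    · subst hz
      rw [List.dropWhile_cons_of_pos (by simp)]
      exact ih hp.tail (fun y hy => hge y (by simp [hy]))
    · rw [List.dropWhile_cons_of_neg (by simp [hz])]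
      intro hmem
      rcases List.mem_cons.mp hmem with h | h
      · exact hz h.symm
      · have h1 : z ≤ x := (List.pairwise_cons.mp hp).1 x h
        have h2 : x ≤ z := hge z (by simp)
        exact hz (le_antisymm h1 h2)

-- pvProd of (n+1 copies of x) ++ d with x ∉ d
lemma pvProd_replicate_append (n : Nat) (x : String) (d : List String) (hx : x ∉ d) :
    pvProd (List.replicate (n + 1) x ++ d) = ((n : Int) + 2) * pvProd d := by
  set L := List.replicate (n + 1) x ++ d with hL
  have hcx : L.count x = n + 1 := by
    simp [hL, List.count_append, List.count_eq_zero_of_not_mem hx]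
  have hck : ∀ k, k ≠ x → L.count k = d.count k := by
    intro k hk
    simp [hL, List.count_append, List.count_replicate, Ne.symm hk]
  -- pvProd L as a product over the nodup list x :: Set.ofList d
  have hperm : (PySem.Set.ofList L).Perm (x :: PySem.Set.ofList d) := by
    apply (List.perm_ext_iff_of_nodup (PySem.Set.nodup_ofList L) ?_).mpr
    · intro a
      simp only [PySem.Set.mem_ofList, hL, List.mem_append, List.mem_replicate,
        List.mem_cons]
      constructor
      · rintro (⟨-, rfl⟩ | h) <;> simp [*]
      · rintro (rfl | h) <;> simp [*]
    · exact List.nodup_cons.mpr ⟨by simpa [PySem.Set.mem_ofList] using hx,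
        PySem.Set.nodup_ofList d⟩
  unfold pvProd
  rw [(hperm.map (fun k => ((L.count k : Int) + 1))).prod_eq]
  rw [List.map_cons, List.prod_cons, hcx]
  have hmap : (PySem.Set.ofList d).map (fun k => ((L.count k : Int) + 1))
      = (PySem.Set.ofList d).map (fun k => ((d.count k : Int) + 1)) := by
    apply List.map_congr_left
    intro k hk
    have hkd : k ∈ d := (PySem.Set.mem_ofList _ _).mp hk
    have : k ≠ x := fun h => hx (h ▸ hkd)
    rw [hck k this]
  rw [hmap]
  push_cast
  ring

-- B's loop on a sorted list computes total * pvProd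
lemma pvRunLoop_eq (s : List String) (total : Int) :
    s.Pairwise (· ≤ ·) → pvRunLoop s total = total * pvProd s := by
  induction s, total using pvRunLoop.induct with
  | case1 total =>
    intro _
    simp [pvRunLoop, pvProd, PySem.Set.ofList]
  | case2 x xs total run ih =>
    intro hs
    rw [pvRunLoop]
    set t := xs.takeWhile (fun y => y == x) with ht
    set d := xs.dropWhile (fun y => y == x) with hd
    have hxs : xs = t ++ d := (List.takeWhile_append_dropWhile).symm
    have htx : t = List.replicate t.length x := by
      apply List.eq_replicate_of_mem
      intro y hy
      have := List.mem_takeWhile_imp hy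
      simpa using this
    have hge : ∀ y ∈ xs, x ≤ y := (List.pairwise_cons.mp hs).1
    have hxd : x ∉ d := not_mem_dropWhile_of_sorted x xs (List.pairwise_cons.mp hs).2 hge
    have hdrop : xs.drop (1 + t.length - 1) = d := by
      simp only [Nat.add_sub_cancel_left]
      rw [hxs, List.drop_append_of_le_length (le_refl _)]
      simp
    have hdsorted : d.Pairwise (· ≤ ·) := by
      have hp : xs.Pairwise (· ≤ ·) := (List.pairwise_cons.mp hs).2
      rw [hxs] at hp
      exact (List.pairwise_append.mp hp).2.1
    rw [show xs.drop (run - 1) = d from by rw [hdrop]] at ih ⊢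
    rw [ih hdsorted]
    have hdecomp : x :: xs = List.replicate (t.length + 1) x ++ d := by
      rw [hxs, htx]
      simp [List.replicate_succ]
    rw [show pvProd (x :: xs) = pvProd (List.replicate (t.length + 1) x ++ d) from by rw [← hdecomp]]
    rw [pvProd_replicate_append t.length x d hxd]
    have hrun : run = 1 + t.length := rfl
    rw [hrun]
    push_cast
    ring

-- ===== VERDICT (by name: the statement is the Claim_ definition above) =====
theorem solution_spec : Claim_equal_solution := by
  intro clothes _
  unfold Spec_solution solution_alt
  set l := clothes.map (fun p => p.2) with hl
  have hsorted := PySem.List.sorted_pairwise (xs := l) (key := fun x => x)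
  rw [pvRunLoop_eq _ 1 hsorted, one_mul]
  rw [solution_eq_pvProd]
  rw [pvProd_perm _ _ (PySem.List.sorted_perm l (fun x => x) false).symm]
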